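-- pv_equiv track=rewrite | github.com/Tim-schoonewille/mijnbonnetje-v2-async | backend/project/app/utilities/product_item.py | remove_leading_digits
-- ===== SOURCE A (Python) =====
-- def remove_leading_digits(string: str) -> str:
--     parsed_string = []
--     letter_encountered = False
--     for letter in string:
--         if letter.isdigit() and not letter_encountered:
--             continue
--         if letter.isspace() and not letter_encountered:
--             continue
--         if letter.isalpha():
--             letter_encountered = True
--         parsed_string.append(letter)
--     return ''.join(parsed_string)
-- ===== SOURCE B (Python) =====
-- def remove_leading_digits(string: str) -> str:
--     i = next((j for j, c in enumerate(string) if c.isalpha()), len(string))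
--     return ''.join(c for c in string[:i] if not (c.isdigit() or c.isspace())) + string[i:]
-- ===== Notes on version B (the rewrite author's own statement) =====
-- stated objective: simpler
-- what changed: B precomputes the index of the first alphabetic character and returns a filtered prefix plus the verbatim suffix slice, instead of threading a letter_encountered flag through an accumulating append loop.
import Mathlib
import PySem

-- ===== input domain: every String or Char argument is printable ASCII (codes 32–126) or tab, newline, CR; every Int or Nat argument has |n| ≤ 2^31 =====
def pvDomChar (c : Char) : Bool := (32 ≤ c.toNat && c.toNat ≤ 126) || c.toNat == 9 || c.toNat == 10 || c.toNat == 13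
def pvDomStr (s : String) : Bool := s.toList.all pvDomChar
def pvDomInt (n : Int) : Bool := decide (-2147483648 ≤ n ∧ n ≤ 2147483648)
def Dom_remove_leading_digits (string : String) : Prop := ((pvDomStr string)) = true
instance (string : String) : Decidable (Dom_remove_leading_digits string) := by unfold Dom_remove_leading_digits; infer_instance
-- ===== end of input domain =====

-- B precomputes the first-alpha boundary and filters the prefix, instead of A's letter_encountered flag loop.

-- ===== PORT A =====
-- the loop body of A, step for step (flag = letter_encountered)
def rldStepA (st : List Char × Bool) (letter : Char) : List Char × Bool :=
  if PySem.Chars.isdigit letter && !st.2 then st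
  else if PySem.Chars.isspace letter && !st.2 then st
  else if PySem.Chars.isalpha letter then (st.1 ++ [letter], true)
  else (st.1 ++ [letter], st.2)

def remove_leading_digits (string : String) : String :=
  String.mk (string.toList.foldl rldStepA ([], false)).1

-- ===== PORT B =====
def remove_leading_digits_alt (string : String) : String :=
  let cs := string.toList
  let i := (cs.findIdx? (fun c => PySem.Chars.isalpha c)).getD cs.length
  String.mk ((cs.take i).filter (fun c => !(PySem.Chars.isdigit c || PySem.Chars.isspace c)) ++ cs.drop i)

-- ===== PRECONDITION & SPEC =====
def Spec_remove_leading_digits (string : String) (out : String) : Prop := out = remove_leading_digits_alt string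
instance (string : String) (out : String) : Decidable (Spec_remove_leading_digits string out) := by unfold Spec_remove_leading_digits; infer_instance

-- ===== CLAIM (what is proved, stated in full; the proofs are below) =====
def Claim_equal_remove_leading_digits : Prop := ∀ (string : String), Dom_remove_leading_digits string → Spec_remove_leading_digits string (remove_leading_digits string)

-- ===== LEMMAS AND PROOFS =====

-- Python's isalpha is disjoint from isdigit and isspace (ASCII letter ranges)
theorem rld_alpha_not_digit_space (c : Char) (h : PySem.Chars.isalpha c = true) :
    PySem.Chars.isdigit c = false ∧ PySem.Chars.isspace c = false := by
  have e1 : 'A'.val.toNat = 65 := rfl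
  have e2 : 'Z'.val.toNat = 90 := rfl
  have e3 : 'a'.val.toNat = 97 := rfl
  have e4 : 'z'.val.toNat = 122 := rfl
  have e5 : '0'.val.toNat = 48 := rfl
  have e6 : '9'.val.toNat = 57 := rfl
  simp only [PySem.Chars.isalpha, PySem.Chars.isupper, PySem.Chars.islower,
    PySem.Chars.isdigit, PySem.Chars.isspace, Bool.or_eq_true, Bool.and_eq_true,
    decide_eq_true_eq, Char.le_def, UInt32.le_iff_toNat_le, Char.toNat,
    e1, e2, e3, e4, e5, e6] at h ⊢
  rcases h with ⟨h1, h2⟩ | ⟨h1, h2⟩ <;> constructor <;>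
    simp only [Bool.and_eq_false_iff, Bool.or_eq_false_iff, decide_eq_false_iff_not] <;> omega

-- once the flag is set, A's loop appends every remaining character
theorem rld_fold_true (cs : List Char) (acc : List Char) :
    cs.foldl rldStepA (acc, true) = (acc ++ cs, true) := by
  induction cs generalizing acc with
  | nil => simp
  | cons c rest ih =>
      have hstep : rldStepA (acc, true) c = (acc ++ [c], true) := by
        simp [rldStepA]
      simp only [List.foldl_cons]
      rw [hstep, ih]
      simp

-- from flag = false, A's loop computes B's prefix-filter-plus-suffix shape
theorem rld_fold_false (cs : List Char) (acc : List Char) :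
    (cs.foldl rldStepA (acc, false)).1 =
      acc ++ (cs.take ((cs.findIdx? (fun c => PySem.Chars.isalpha c)).getD cs.length)).filter
              (fun c => !(PySem.Chars.isdigit c || PySem.Chars.isspace c))
          ++ cs.drop ((cs.findIdx? (fun c => PySem.Chars.isalpha c)).getD cs.length) := by
  induction cs generalizing acc with
  | nil => simp
  | cons c rest ih =>
      by_cases ha : PySem.Chars.isalpha c = true
      · obtain ⟨hd, hs⟩ := rld_alpha_not_digit_space c ha
        have hstep : rldStepA (acc, false) c = (acc ++ [c], true) := by
          simp [rldStepA, ha, hd, hs]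
        simp only [List.findIdx?_cons, ha, if_pos, List.foldl_cons]
        rw [hstep, rld_fold_true]
        simp
      · have hfind : ((c :: rest).findIdx? (fun c => PySem.Chars.isalpha c)).getD (c :: rest).length
            = ((rest.findIdx? (fun c => PySem.Chars.isalpha c)).getD rest.length) + 1 := by
          cases h : rest.findIdx? (fun c => PySem.Chars.isalpha c) <;>
            simp [List.findIdx?_cons, ha, h]
        rw [hfind]
        simp only [List.take_succ_cons, List.drop_succ_cons, List.foldl_cons]
        by_cases hd : (PySem.Chars.isdigit c || PySem.Chars.isspace c) = true
        · have hstep : rldStepA (acc, false) c = (acc, false) := by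
            rcases Bool.or_eq_true_iff.mp hd with h | h
            · simp [rldStepA, h]
            · by_cases h1 : PySem.Chars.isdigit c = true
              · simp [rldStepA, h1]
              · simp [rldStepA, h1, h]
          rw [hstep, ih, List.filter_cons_of_neg (by simp [hd])]
        · have hp : (!(PySem.Chars.isdigit c || PySem.Chars.isspace c)) = true := by
            simp [eq_false_of_ne_true hd]
          have h1 : PySem.Chars.isdigit c = false := by
            rcases Bool.or_eq_false_iff.mp (eq_false_of_ne_true hd) with ⟨a, _⟩; exact a
          have h2 : PySem.Chars.isspace c = false := by
            rcases Bool.or_eq_false_iff.mp (eq_false_of_ne_true hd) with ⟨_, b⟩; exact b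
          have hstep : rldStepA (acc, false) c = (acc ++ [c], false) := by
            simp [rldStepA, h1, h2, ha]
          rw [hstep, ih, List.filter_cons]
          simp [h1, h2]

-- ===== VERDICT (by name: the statement is the Claim_ definition above) =====
theorem remove_leading_digits_spec : Claim_equal_remove_leading_digits := by
  intro s _
  unfold Spec_remove_leading_digits remove_leading_digits remove_leading_digits_alt
  rw [rld_fold_false]
  simp
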